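-- pv_equiv track=rewrite | github.com/AbdulHakeemPH40/Experiment2 | Palindrome_split1.py | max_palindromic_subsequences
-- ===== SOURCE A (Python) =====
-- def max_palindromic_subsequences(s):
--     # Dictionary to store the frequency of each character
--     frequency = {}
--     for char in s:
--         if char in frequency:
--             frequency[char] += 1
--         else:
--             frequency[char] = 1
--
--     # Initialize count of palindromic subsequences
--     count = 0
--
--     # Calculate pairs for each character
--     for char in frequency:
--         pairs = frequency[char] // 2  # Number of pairs for this character
--         count += pairs  # Add to total count
--
--     return count
-- ===== SOURCE B (Python) =====
-- def max_palindromic_subsequences(s):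
--     chars = sorted(s)
--     count = 0
--     i = 0
--     while i + 1 < len(chars):
--         if chars[i] == chars[i + 1]:
--             count += 1
--             i += 2
--         else:
--             i += 1
--     return count
-- ===== Notes on version B (the rewrite author's own statement) =====
-- stated objective: alternative
-- what changed: Replaces the frequency dictionary and the per-key pairs sum with a sort followed by one adjacency scan that consumes equal neighbouring characters as pairs.
import Mathlib
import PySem

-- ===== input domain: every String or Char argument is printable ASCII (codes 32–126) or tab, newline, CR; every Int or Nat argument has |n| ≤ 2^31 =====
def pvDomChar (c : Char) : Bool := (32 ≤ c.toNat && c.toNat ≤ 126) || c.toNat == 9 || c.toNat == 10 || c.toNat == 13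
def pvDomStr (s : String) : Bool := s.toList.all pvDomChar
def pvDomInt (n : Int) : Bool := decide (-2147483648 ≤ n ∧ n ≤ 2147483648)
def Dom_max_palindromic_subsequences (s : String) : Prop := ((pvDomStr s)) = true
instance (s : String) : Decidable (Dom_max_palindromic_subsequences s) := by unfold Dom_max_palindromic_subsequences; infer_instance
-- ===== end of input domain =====

-- B replaces A's frequency-dictionary + per-key pairs sum by sort-then-adjacency-scan (alternative algorithm; no speed claim).


-- ===== PORT A =====
def max_palindromic_subsequences (s : String) : Int :=
  let frequency := s.toList.foldl
    (fun d char => if d.contains char then d.modify char 0 (· + 1) else d.insert char 1)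
    PySem.Dict.empty
  -- 'for char in frequency' iterates the dict's keys; 'frequency[char]' never raises there
  -- (char is a key), so 'getD char 0' is exact here
  frequency.keys.foldl
    (fun count char => count + PySem.Int.floordiv (frequency.getD char 0) 2) 0

-- ===== PORT B =====
-- Source B's while-loop over the sorted list: look at two neighbours, consume both on a match,
-- else advance by one; ported as the corresponding recursion over the sorted list.
def pairUpSorted : List Char → Int
  | a :: b :: t => if a = b then 1 + pairUpSorted t else pairUpSorted (b :: t)
  | _ => 0
termination_by l => l.length
decreasing_by all_goals simp

def max_palindromic_subsequences_alt (s : String) : Int :=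
  pairUpSorted (PySem.List.sorted s.toList (fun x => x) false)

-- ===== PRECONDITION & SPEC =====
def Spec_max_palindromic_subsequences (s : String) (out : Int) : Prop := out = max_palindromic_subsequences_alt s
instance (s : String) (out : Int) : Decidable (Spec_max_palindromic_subsequences s out) := by unfold Spec_max_palindromic_subsequences; infer_instance

-- ===== CLAIM (what is proved, stated in full; the proofs are below) =====
def Claim_equal_max_palindromic_subsequences : Prop := ∀ (s : String), Dom_max_palindromic_subsequences s → Spec_max_palindromic_subsequences s (max_palindromic_subsequences s)

-- ===== LEMMAS AND PROOFS =====

-- A's value: the sum of count/2 over the distinct characters of s.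
theorem portA_eq_sum (s : String) :
    max_palindromic_subsequences s =
      ((PySem.Set.ofList s.toList).map
        (fun c => ((s.toList.count c / 2 : Nat) : Int))).sum := by
  unfold max_palindromic_subsequences
  have hstep : (fun (d : PySem.Dict Char Int) (char : Char) =>
      if d.contains char then d.modify char 0 (· + 1) else d.insert char 1)
      = (fun d char => d.modify char 0 (· + 1)) := by
    funext d c
    by_cases h : d.contains c
    · simp [h]
    · simp only [h, Bool.false_eq_true, if_false, PySem.Dict.modify]
      rw [PySem.Dict.getD_of_not_contains d 0 (by simpa using h)]
      norm_num
  simp only [hstep]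
  rw [← PySem.Dict.counter_eq_foldl]
  rw [PySem.Dict.keys_counter]
  rw [PySem.List.foldl_add (g := fun c => PySem.Int.floordiv ((PySem.Dict.counter s.toList).getD c 0) 2)]
  rw [zero_add]
  congr 1
  apply List.map_congr_left
  intro c _
  rw [PySem.Dict.getD_counter]
  exact_mod_cast PySem.Int.floordiv_natCast (s.toList.count c) 2

-- Sums of the same function over two nodup lists with the same members agree.
theorem sum_nodup_ext (f : Char → Int) (d₁ d₂ : List Char)
    (h₁ : d₁.Nodup) (h₂ : d₂.Nodup) (h : ∀ x, x ∈ d₁ ↔ x ∈ d₂) :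
    (d₁.map f).sum = (d₂.map f).sum :=
  (((List.perm_ext_iff_of_nodup h₁ h₂).mpr h).map f).sum_eq

-- The adjacency scan over a block of k equal characters followed by an a-free tail
-- yields k / 2 pairs plus the pairs of the tail.
theorem pairUp_replicate (a : Char) (r : List Char) (h : a ∉ r) :
    ∀ k, pairUpSorted (List.replicate k a ++ r) = ((k / 2 : Nat) : Int) + pairUpSorted r
  | 0 => by simp
  | 1 => by
      cases r with
      | nil => simp [pairUpSorted]
      | cons b t =>
          have hab : a ≠ b := fun e => h (e ▸ List.mem_cons_self)
          simp [pairUpSorted, hab]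
  | (k + 2) => by
      have ih := pairUp_replicate a r h k
      have he : List.replicate (k + 2) a ++ r = a :: a :: (List.replicate k a ++ r) := by
        simp [List.replicate_succ]
      rw [he]
      simp only [pairUpSorted, ih]
      have h2 : (k + 2) / 2 = k / 2 + 1 := by omega
      rw [h2]; push_cast; ring

-- In a sorted list, all copies of the head form an initial block.
theorem sorted_decomp :
    ∀ (t : List Char) (a : Char), (a :: t).Pairwise (· ≤ ·) →
      a :: t = List.replicate ((a :: t).count a) a ++ t.filter (fun x => !(x == a)) := by
  intro t
  induction t with
  | nil => intro a _; simp
  | cons b t' ih =>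
      intro a h
      by_cases hba : b = a
      · subst hba
        have htail : (b :: t').Pairwise (· ≤ ·) := h.of_cons
        have hdec := ih b htail
        have hcount : ((b :: b :: t').count b) = ((b :: t').count b) + 1 := by
          simp
        rw [hcount, List.replicate_succ, List.cons_append]
        have hfil : (b :: t').filter (fun x => !(x == b)) = t'.filter (fun x => !(x == b)) := by
          simp
        rw [hfil]
        exact congrArg (b :: ·) hdec
      · -- a < b ≤ everything in t', so a does not occur in b :: t'
        have hmem : a ∉ b :: t' := by
          intro hm
          rcases List.mem_cons.mp hm with he | hm'
          · exact hba he.symm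
          · have h1 : a ≤ b := (List.pairwise_cons.mp h).1 b List.mem_cons_self
            have h2 : b ≤ a := (List.pairwise_cons.mp h.of_cons).1 a hm'
            exact hba (le_antisymm h2 h1)
        have hc : ((a :: b :: t').count a) = 1 := by
          simp [List.count_eq_zero.mpr hmem]
        rw [hc]
        have hfil : (b :: t').filter (fun x => !(x == a)) = b :: t' := by
          apply List.filter_eq_self.mpr
          intro x hx
          simp only [Bool.not_eq_eq_eq_not, Bool.not_true, beq_eq_false_iff_ne]
          intro he; exact hmem (he ▸ hx)
        rw [hfil]
        simp

-- The adjacency scan on any sorted list computes the sum of count/2 over distinct characters.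
theorem pairUp_sorted_eq :
    ∀ m : List Char, m.Pairwise (· ≤ ·) →
      pairUpSorted m = ((PySem.Set.ofList m).map (fun c => ((m.count c / 2 : Nat) : Int))).sum
  | [], _ => by simp [pairUpSorted]
  | a :: t, h => by
      have har : a ∉ t.filter (fun x => !(x == a)) := by simp
      have hrs : (t.filter (fun x => !(x == a))).Pairwise (· ≤ ·) := h.of_cons.filter _
      have ih := pairUp_sorted_eq (t.filter (fun x => !(x == a))) hrs
      have hk1 : List.count a (a :: t) ≠ 0 := by simp
      have hcr : List.count a (t.filter (fun x => !(x == a))) = 0 := List.count_eq_zero.mpr har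
      rw [sorted_decomp t a h, pairUp_replicate a _ har, ih]
      set r := t.filter (fun x => !(x == a)) with hr
      set k := List.count a (a :: t) with hkdef
      have hsum : ((PySem.Set.ofList (List.replicate k a ++ r)).map
            (fun c => ((List.count c (List.replicate k a ++ r) / 2 : Nat) : Int))).sum
          = ((a :: PySem.Set.ofList r).map
            (fun c => ((List.count c (List.replicate k a ++ r) / 2 : Nat) : Int))).sum := by
        apply sum_nodup_ext
        · exact PySem.Set.nodup_ofList _
        · exact List.nodup_cons.mpr
            ⟨fun hm => har (by simpa using hm), PySem.Set.nodup_ofList _⟩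
        · intro x
          simp only [PySem.Set.mem_ofList, List.mem_append, List.mem_replicate, List.mem_cons]
          constructor
          · rintro (⟨-, hx⟩ | hx)
            · exact Or.inl hx
            · exact Or.inr hx
          · rintro (hx | hx)
            · exact Or.inl ⟨hk1, hx⟩
            · exact Or.inr hx
      rw [hsum]
      simp only [List.map_cons, List.sum_cons]
      congr 1
      · have hka : List.count a (List.replicate k a ++ r) = k := by
          rw [List.count_append, List.count_replicate_self, hcr]; omega
        rw [hka]
      · apply congrArg
        apply List.map_congr_left
        intro c hc
        have hcmem : c ∈ r := by simpa using hc
        have hca : ¬ (c = a) := by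
          have := List.of_mem_filter hcmem
          simpa using this
        have hac : ¬ a = c := fun e => hca e.symm
        have hkc : List.count c (List.replicate k a ++ r) = List.count c r := by
          rw [List.count_append, List.count_replicate]
          simp [hac]
        rw [hkc]
termination_by m => m.length
decreasing_by simp; exact List.length_filter_le _ _

-- ===== VERDICT (by name: the statement is the Claim_ definition above) =====
theorem max_palindromic_subsequences_spec : Claim_equal_max_palindromic_subsequences := by
  intro s _
  unfold Spec_max_palindromic_subsequences max_palindromic_subsequences_alt
  rw [portA_eq_sum]
  have hpw : (PySem.List.sorted s.toList (fun x => x) false).Pairwise (· ≤ ·) := by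
    simpa using PySem.List.sorted_pairwise (xs := s.toList) (key := fun x => x)
  rw [pairUp_sorted_eq _ hpw]
  have hp : (PySem.List.sorted s.toList (fun x => x) false).Perm s.toList :=
    PySem.List.sorted_perm _ _ _
  have hcnt : ((PySem.Set.ofList (PySem.List.sorted s.toList (fun x => x) false)).map
        (fun c => (((PySem.List.sorted s.toList (fun x => x) false).count c / 2 : Nat) : Int)))
      = ((PySem.Set.ofList (PySem.List.sorted s.toList (fun x => x) false)).map
        (fun c => ((s.toList.count c / 2 : Nat) : Int))) := by
    apply List.map_congr_left
    intro c _
    rw [hp.count_eq c]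
  rw [hcnt]
  exact sum_nodup_ext _ _ _ (PySem.Set.nodup_ofList _) (PySem.Set.nodup_ofList _)
    (fun x => by rw [PySem.Set.mem_ofList, PySem.Set.mem_ofList]; exact hp.symm.mem_iff)
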